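-- pv_equiv track=rewrite | github.com/simaaksidd/Programming_Assignments | Prog/DNA.py | all_substrings
-- ===== SOURCE A (Python) =====
-- def all_substrings(s):
--   # a list of all substrings of s
--   result = []
--
--   # define a window
--   wnd = len(s)
--
--   # get all substrings
--   while (wnd > 0):
--     idx = 0
--     while (idx + wnd) <= len(s):
--       sub_str = s[idx:idx+wnd]
--       result.append(sub_str)
--       idx = idx + 1
--     wnd = wnd - 1
--
--   # return the result
--   return result
-- ===== SOURCE B (Python) =====
-- def all_substrings(s):
--   # build every substring in start-major order, then stable-sort by decreasing length;
--   # stability keeps starts increasing within each length, matching A's order exactly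
--   n = len(s)
--   subs = [s[i:j] for i in range(n) for j in range(i + 1, n + 1)]
--   subs.sort(key=lambda x: -len(x))
--   return subs
-- ===== Notes on version B (the rewrite author's own statement) =====
-- stated objective: alternative
-- what changed: A enumerates substrings directly with nested length-descending while loops; B builds all substrings in start-major order with one comprehension and then stable-sorts them by decreasing length, relying on sort stability for the tie order.
import Mathlib
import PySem

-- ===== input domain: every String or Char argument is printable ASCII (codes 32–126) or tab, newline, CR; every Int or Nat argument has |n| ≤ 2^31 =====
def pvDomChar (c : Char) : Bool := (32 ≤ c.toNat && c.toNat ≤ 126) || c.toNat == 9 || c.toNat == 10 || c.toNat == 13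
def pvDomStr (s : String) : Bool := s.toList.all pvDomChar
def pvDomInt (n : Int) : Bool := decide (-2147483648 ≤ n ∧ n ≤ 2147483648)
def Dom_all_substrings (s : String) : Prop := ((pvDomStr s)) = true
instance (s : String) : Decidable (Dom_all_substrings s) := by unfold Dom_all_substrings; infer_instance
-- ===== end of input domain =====

-- B generates all substrings start-major with one comprehension and stable-sorts by decreasing
-- length (a build-then-sort decomposition instead of A's direct nested window while loops).

-- ===== PORT A =====
-- inner while loop: while (idx + wnd) <= len(s): append s[idx:idx+wnd]; idx += 1
def allSubsInner (s : String) (n wnd idx : Nat) (acc : List String) : List String :=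
  if idx + wnd ≤ n then
    allSubsInner s n wnd (idx + 1)
      (acc ++ [PySem.Str.slice s (some (idx : Int)) (some ((idx : Int) + (wnd : Int)))])
  else acc
termination_by n + 1 - idx
decreasing_by omega

-- outer while loop: while wnd > 0: <inner loop with idx = 0>; wnd -= 1
def allSubsOuter (s : String) (n : Nat) : Nat → List String → List String
  | 0, acc => acc
  | w + 1, acc => allSubsOuter s n w (allSubsInner s n (w + 1) 0 acc)

def all_substrings (s : String) : List String :=
  let n := (PySem.Str.len s).toNat
  allSubsOuter s n n []

-- ===== PORT B =====
def all_substrings_alt (s : String) : List String :=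
  let n : Int := PySem.Str.len s
  let subs := (PySem.List.pyRange 0 n 1).flatMap (fun i =>
    (PySem.List.pyRange (i + 1) (n + 1) 1).map (fun j =>
      PySem.Str.slice s (some i) (some j)))
  PySem.List.sorted subs (fun x => -(PySem.Str.len x))

-- ===== PRECONDITION & SPEC =====
def Spec_all_substrings (s : String) (out : List String) : Prop := out = all_substrings_alt s
instance (s : String) (out : List String) : Decidable (Spec_all_substrings s out) := by unfold Spec_all_substrings; infer_instance

-- ===== CLAIM (what is proved, stated in full; the proofs are below) =====
def Claim_equal_all_substrings : Prop := ∀ (s : String), Dom_all_substrings s → Spec_all_substrings s (all_substrings s)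

-- ===== LEMMAS AND PROOFS =====

-- the substring s[i:j] for natural indices
def pvSub (s : String) (i j : Nat) : String :=
  PySem.Str.slice s (some (i : Int)) (some (j : Int))

-- the block of all substrings of length w, starts increasing
def pvBlock (s : String) (n w : Nat) : List String :=
  (List.range (n + 1 - w)).map (fun i => pvSub s i (i + w))

-- blocks for window sizes w, w-1, …, 1
def pvBlocks (s : String) (n : Nat) : Nat → List String
  | 0 => []
  | w + 1 => pvBlock s n (w + 1) ++ pvBlocks s n w

lemma pv_inner_spec (s : String) (n wnd : Nat) :
    ∀ (d idx : Nat) (acc : List String), d = n + 1 - (idx + wnd) →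
      allSubsInner s n wnd idx acc
        = acc ++ (List.range d).map (fun k => pvSub s (idx + k) (idx + k + wnd)) := by
  intro d
  induction d with
  | zero =>
    intro idx acc hd
    rw [allSubsInner]
    simp only [List.range_zero, List.map_nil, List.append_nil]
    rw [if_neg (by omega)]
  | succ d ih =>
    intro idx acc hd
    rw [allSubsInner, if_pos (by omega)]
    rw [ih (idx + 1) _ (by omega), List.range_succ_eq_map, List.map_cons, List.map_map]
    simp only [List.append_assoc, List.singleton_append, Function.comp_def]
    have hh : pvSub s (idx + 0) (idx + 0 + wnd)
        = PySem.Str.slice s (some (idx : Int)) (some ((idx : Int) + (wnd : Int))) := by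
      simp [pvSub]
    rw [hh]
    have hfun : (fun k : Nat => pvSub s (idx + 1 + k) (idx + 1 + k + wnd))
        = fun k : Nat => pvSub s (idx + Nat.succ k) (idx + Nat.succ k + wnd) := by
      funext k
      have e : idx + 1 + k = idx + Nat.succ k := by omega
      rw [e]
    rw [hfun]

lemma pv_outer_spec (s : String) (n : Nat) :
    ∀ (w : Nat) (acc : List String), allSubsOuter s n w acc = acc ++ pvBlocks s n w := by
  intro w
  induction w with
  | zero => intro acc; simp [allSubsOuter, pvBlocks]
  | succ w ih =>
    intro acc
    rw [allSubsOuter, ih, pv_inner_spec s n (w + 1) (n + 1 - (0 + (w + 1))) 0 acc rfl]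
    simp only [pvBlocks, pvBlock, List.append_assoc, Nat.zero_add]

lemma pv_A_eq (s : String) :
    all_substrings s = pvBlocks s s.toList.length s.toList.length := by
  have h : (PySem.Str.len s).toNat = s.toList.length := by
    rw [PySem.Str.len_eq]; omega
  simp only [all_substrings, h, pv_outer_spec, List.nil_append]

-- ---- generic stable-sort-by-key characterisation ----

lemma pv_insertBy_prefix {α : Type} (before : α → α → Bool) (x : α) (ys zs : List α)
    (h : ∀ y ∈ ys, before x y = false) :
    PySem.List.insertBy before x (ys ++ zs) = ys ++ PySem.List.insertBy before x zs := by
  induction ys with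
  | nil => simp
  | cons y ys ih =>
    rw [List.cons_append, PySem.List.insertBy, if_neg (by simp [h y (by simp)])]
    rw [ih (fun y hy => h y (by simp [hy]))]
    simp

lemma pv_insertBy_head {α : Type} (before : α → α → Bool) (x : α) (zs : List α)
    (h : ∀ z ∈ zs, before x z = true) :
    PySem.List.insertBy before x zs = x :: zs := by
  cases zs with
  | nil => rfl
  | cons z zs => rw [PySem.List.insertBy, if_pos (h z (by simp))]

lemma pv_flatMap_congr {α β : Type} (l : List α) (f g : α → List β)
    (h : ∀ a ∈ l, f a = g a) : l.flatMap f = l.flatMap g := by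
  induction l with
  | nil => rfl
  | cons a l ih =>
    simp only [List.flatMap_cons, h a (by simp), ih (fun a ha => h a (by simp [ha]))]

-- stable sort by key = concatenation, over the possible keys in increasing order,
-- of the input filtered to that key (order within each key class preserved)
lemma pv_sorted_blocks {α : Type} (key : α → Int) (ks : List Int) (xs : List α)
    (hks : ks.Pairwise (· < ·)) (hmem : ∀ x ∈ xs, key x ∈ ks) :
    PySem.List.sorted xs key
      = ks.flatMap (fun k => xs.filter (fun x => decide (key x = k))) := by
  induction xs using List.reverseRecOn with
  | nil => simp [PySem.List.sorted_eq_foldl_insertBy]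
  | append_singleton xs x ih =>
    rw [PySem.List.sorted_eq_foldl_insertBy, List.foldl_append, List.foldl_cons, List.foldl_nil,
      ← PySem.List.sorted_eq_foldl_insertBy,
      ih (fun y hy => hmem y (by simp [hy]))]
    obtain ⟨ks1, ks2, hks'⟩ := List.append_of_mem (hmem x (by simp))
    subst hks'
    have hp := List.pairwise_append.mp hks
    have h1 : ∀ k ∈ ks1, k < key x := fun k hk => hp.2.2 k hk (key x) (by simp)
    have h2 : ∀ k ∈ ks2, key x < k := (List.pairwise_cons.mp hp.2.1).1
    have hpre : ∀ y ∈ (ks1.flatMap (fun k => xs.filter (fun y => decide (key y = k)))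
        ++ xs.filter (fun y => decide (key y = key x))),
        (fun a b => decide (key a < key b)) x y = false := by
      intro y hy
      simp only [decide_eq_false_iff_not, not_lt]
      rcases List.mem_append.mp hy with hy | hy
      · obtain ⟨k, hk, hyk⟩ := List.mem_flatMap.mp hy
        have hky : key y = k := of_decide_eq_true (List.mem_filter.mp hyk).2
        have := h1 k hk
        omega
      · have hky : key y = key x := of_decide_eq_true (List.mem_filter.mp hy).2
        omega
    have hhd : ∀ z ∈ ks2.flatMap (fun k => xs.filter (fun y => decide (key y = k))),
        (fun a b => decide (key a < key b)) x z = true := by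
      intro z hz
      obtain ⟨k, hk, hzk⟩ := List.mem_flatMap.mp hz
      have hkz : key z = k := of_decide_eq_true (List.mem_filter.mp hzk).2
      have := h2 k hk
      simp only [decide_eq_true_eq]
      omega
    have hL : PySem.List.insertBy (fun a b => decide (key a < key b)) x
        ((ks1 ++ key x :: ks2).flatMap (fun k => xs.filter (fun y => decide (key y = k))))
        = (ks1.flatMap (fun k => xs.filter (fun y => decide (key y = k)))
            ++ xs.filter (fun y => decide (key y = key x)))
          ++ x :: ks2.flatMap (fun k => xs.filter (fun y => decide (key y = k))) := by
      rw [List.flatMap_append, List.flatMap_cons, ← List.append_assoc,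
        pv_insertBy_prefix _ x _ _ hpre, pv_insertBy_head _ x _ hhd]
    rw [hL]
    conv_rhs => rw [List.flatMap_append, List.flatMap_cons]
    rw [pv_flatMap_congr ks1 (fun k => (xs ++ [x]).filter (fun y => decide (key y = k)))
        (fun k => xs.filter (fun y => decide (key y = k)))
        (by
          intro k hk
          simp only [List.filter_append]
          have hx : List.filter (fun y => decide (key y = k)) [x] = [] := by
            simp only [List.filter_cons, List.filter_nil]
            rw [if_neg (by simp only [decide_eq_true_eq]; have := h1 k hk; omega)]
          rw [hx, List.append_nil]),
      pv_flatMap_congr ks2 (fun k => (xs ++ [x]).filter (fun y => decide (key y = k)))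
        (fun k => xs.filter (fun y => decide (key y = k)))
        (by
          intro k hk
          simp only [List.filter_append]
          have hx : List.filter (fun y => decide (key y = k)) [x] = [] := by
            simp only [List.filter_cons, List.filter_nil]
            rw [if_neg (by simp only [decide_eq_true_eq]; have := h2 k hk; omega)]
          rw [hx, List.append_nil]),
      List.filter_append]
    have hx1 : List.filter (fun y => decide (key y = key x)) [x] = [x] := by simp
    rw [hx1]
    simp [List.append_assoc]

-- ---- helper lemmas ----

lemma pv_key_sub (s : String) (i j : Nat) (hij : i ≤ j) (hj : j ≤ s.toList.length) :
    -(PySem.Str.len (pvSub s i j)) = -((j : Int) - (i : Int)) := by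
  have h : (pvSub s i j).toList = (s.toList.drop i).take (j - i) := by
    rw [pvSub, PySem.Str.toList_slice, PySem.Chars.slice_eq_listSlice, PySem.List.slice_natCast]
  rw [PySem.Str.len_eq, h]
  simp only [List.length_take, List.length_drop]
  omega

lemma pv_range_filter_eq (m a : Nat) :
    (List.range m).filter (fun k => decide (k = a)) = if a < m then [a] else [] := by
  induction m with
  | zero => simp
  | succ m ih =>
    rw [List.range_succ, List.filter_append, ih]
    simp only [List.filter_cons, List.filter_nil, decide_eq_true_eq]
    by_cases h2 : m = a
    · subst h2
      simp
    · rw [if_neg h2]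
      by_cases h : a < m
      · rw [if_pos h, if_pos (by omega)]
        simp
      · rw [if_neg h, if_neg (by omega)]
        simp

lemma pv_flatMap_ite {β : Type} (f : Nat → List β) :
    ∀ (m c : Nat), (List.range m).flatMap (fun i => if i < c then f i else [])
      = (List.range (min c m)).flatMap f := by
  intro m
  induction m with
  | zero => simp
  | succ m ih =>
    intro c
    rw [List.range_succ, List.flatMap_append, ih]
    simp only [List.flatMap_cons, List.flatMap_nil, List.append_nil]
    by_cases h : m < c
    · rw [if_pos h]
      have h1 : min c (m + 1) = m + 1 := by omega
      have h2 : min c m = m := by omega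
      rw [h1, h2, List.range_succ, List.flatMap_append]
      simp
    · rw [if_neg h]
      have h1 : min c (m + 1) = min c m := by omega
      rw [h1]
      simp

-- ---- B-side: comprehension in natural-number form, then sort = blocks ----

lemma pv_B_subs_eq (s : String) :
    (PySem.List.pyRange 0 (PySem.Str.len s) 1).flatMap (fun i =>
      (PySem.List.pyRange (i + 1) (PySem.Str.len s + 1) 1).map (fun j =>
        PySem.Str.slice s (some i) (some j)))
    = (List.range s.toList.length).flatMap (fun i =>
        (List.range (s.toList.length - i)).map (fun t => pvSub s i (i + 1 + t))) := by
  rw [PySem.Str.len_eq, PySem.List.pyRange_one]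
  have h0 : ((s.toList.length : Int) - 0).toNat = s.toList.length := by omega
  rw [h0, List.flatMap_map]
  refine pv_flatMap_congr _ _ _ ?_
  intro i hi
  rw [PySem.List.pyRange_one]
  have hcnt : ((s.toList.length : Int) + 1 - (0 + (i : Int) + 1)).toNat = s.toList.length - i := by
    have := List.mem_range.mp hi
    omega
  rw [hcnt, List.map_map]
  refine List.map_congr_left ?_
  intro t _
  simp only [Function.comp_apply, pvSub]
  congr 2
  · ring
  · push_cast
    ring

lemma pv_blocks_eq_flatMap (s : String) (N : Nat) :
    ∀ m : Nat, pvBlocks s N m = (List.range m).flatMap (fun t => pvBlock s N (m - t)) := by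
  intro m
  induction m with
  | zero => simp [pvBlocks]
  | succ m ih =>
    rw [pvBlocks, ih, List.range_succ_eq_map, List.flatMap_cons, List.flatMap_map]
    simp only [Nat.sub_zero]
    congr 1
    refine pv_flatMap_congr _ _ _ ?_
    intro t _
    have h : m + 1 - Nat.succ t = m - t := by omega
    rw [h]

lemma pv_filter_flatMap {α β : Type} (l : List α) (f : α → List β) (p : β → Bool) :
    (l.flatMap f).filter p = l.flatMap (fun a => (f a).filter p) := by
  induction l with
  | nil => rfl
  | cons a l ih => simp only [List.flatMap_cons, List.filter_append, ih]

lemma pv_B_block (s : String) (t : Nat) (ht : t < s.toList.length) :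
    ((List.range s.toList.length).flatMap (fun i =>
        (List.range (s.toList.length - i)).map (fun tt => pvSub s i (i + 1 + tt)))).filter
      (fun x => decide (-(PySem.Str.len x) = -(s.toList.length : Int) + (t : Int)))
    = pvBlock s s.toList.length (s.toList.length - t) := by
  set N := s.toList.length with hN
  set w := N - t with hw
  have hw1 : 1 ≤ w := by omega
  have hwN : w ≤ N := by omega
  rw [pv_filter_flatMap]
  rw [pv_flatMap_congr _ _ (fun i => if i < N + 1 - w then [pvSub s i (i + w)] else []) ?hb]
  case hb =>
    intro i hi
    have hi' : i < N := List.mem_range.mp hi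
    beta_reduce
    rw [List.filter_map, List.filter_congr (q := fun tt => decide (tt = w - 1)) ?hq]
    case hq =>
      intro tt htt
      have htt' : tt < N - i := List.mem_range.mp htt
      simp only [Function.comp_apply]
      rw [pv_key_sub s i (i + 1 + tt) (by omega) (by omega)]
      simp only [decide_eq_decide]
      omega
    rw [pv_range_filter_eq]
    by_cases h : i < N + 1 - w
    · rw [if_pos (by omega), if_pos h, List.map_cons, List.map_nil]
      have he : i + 1 + (w - 1) = i + w := by omega
      rw [he]
    · rw [if_neg (by omega), if_neg h, List.map_nil]
  rw [pv_flatMap_ite (fun i => [pvSub s i (i + w)]) N (N + 1 - w)]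
  have hmin : min (N + 1 - w) N = N + 1 - w := by omega
  rw [hmin, pvBlock, ← List.map_eq_flatMap]

lemma pv_B_eq (s : String) :
    all_substrings_alt s = pvBlocks s s.toList.length s.toList.length := by
  set N := s.toList.length with hN
  show PySem.List.sorted
    ((PySem.List.pyRange 0 (PySem.Str.len s) 1).flatMap (fun i =>
      (PySem.List.pyRange (i + 1) (PySem.Str.len s + 1) 1).map (fun j =>
        PySem.Str.slice s (some i) (some j))))
    (fun x => -(PySem.Str.len x)) = pvBlocks s N N
  rw [pv_B_subs_eq]
  have hmem : ∀ x ∈ (List.range N).flatMap (fun i =>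
      (List.range (N - i)).map (fun t => pvSub s i (i + 1 + t))),
      -(PySem.Str.len x) ∈ PySem.List.pyRange (-(N : Int)) 0 1 := by
    intro x hx
    obtain ⟨i, hi, hxi⟩ := List.mem_flatMap.mp hx
    obtain ⟨t, ht, rfl⟩ := List.mem_map.mp hxi
    have hi' : i < N := List.mem_range.mp hi
    have ht' : t < N - i := List.mem_range.mp ht
    rw [pv_key_sub s i (i + 1 + t) (by omega) (by omega), PySem.List.mem_pyRange_one]
    constructor <;> push_cast <;> omega
  rw [pv_sorted_blocks (fun x => -(PySem.Str.len x)) (PySem.List.pyRange (-(N : Int)) 0 1) _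
    (PySem.List.pairwise_lt_pyRange_one _ _) hmem]
  rw [PySem.List.pyRange_one]
  have h0 : ((0 : Int) - -(N : Int)).toNat = N := by omega
  rw [h0, List.flatMap_map]
  rw [pv_flatMap_congr _ _ (fun t => pvBlock s N (N - t))
    (fun t ht => pv_B_block s t (List.mem_range.mp ht))]
  rw [← pv_blocks_eq_flatMap s N N]

-- ===== VERDICT (by name: the statement is the Claim_ definition above) =====
theorem all_substrings_spec : Claim_equal_all_substrings := by
  intro s _
  show all_substrings s = all_substrings_alt s
  rw [pv_A_eq, pv_B_eq]
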